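-- pv_equiv track=rewrite | github.com/sujal3011/REChase2024 | guessing/utils.py | solve
-- ===== SOURCE A (Python) =====
-- def solve(x, y):
--     x = str(x)
--     y = str(y)
--     key = 0
--     chase = 0
--     for i in range(0, 5):
--         if x[i] == y[i]:
--             key = key + 1
--     for i in range(0, 5):
--         for j in range(0, 5):
--             if i != j and x[i] == y[j]:
--                 chase = chase + 1
--     string = str(key) + " Keys and " + str(chase) + " Chase"
--     return string
-- ===== SOURCE B (Python) =====
-- def solve(x, y):
--     x = str(x)
--     y = str(y)
--     key = 0
--     for i in range(0, 5):
--         if x[i] == y[i]: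
--             key = key + 1
--     # chase via a counting identity: total matching (i,j) pairs minus the diagonal
--     x5 = x[:5]
--     y5 = y[:5]
--     total = 0
--     for ch in x5:
--         total += y5.count(ch)
--     chase = total - key
--     return str(key) + " Keys and " + str(chase) + " Chase"
-- ===== Notes on version B (the rewrite author's own statement) =====
-- stated objective: alternative
-- what changed: Replaces A's nested 5x5 cross-position scan with a counting identity: chase = sum over the first five chars of x of their occurrence count in y[:5], minus the diagonal matches (key).
import Mathlib
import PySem

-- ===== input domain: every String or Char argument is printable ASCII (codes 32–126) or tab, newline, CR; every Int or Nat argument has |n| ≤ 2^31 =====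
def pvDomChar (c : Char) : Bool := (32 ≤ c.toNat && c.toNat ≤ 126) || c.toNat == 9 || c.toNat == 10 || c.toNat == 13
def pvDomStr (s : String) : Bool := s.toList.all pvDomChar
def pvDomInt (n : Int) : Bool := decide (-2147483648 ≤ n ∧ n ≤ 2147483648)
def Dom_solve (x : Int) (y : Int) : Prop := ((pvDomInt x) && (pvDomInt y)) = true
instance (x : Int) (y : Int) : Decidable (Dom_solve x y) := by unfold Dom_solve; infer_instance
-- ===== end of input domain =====

-- B replaces the nested 5x5 cross-position scan by per-character occurrence counts minus the diagonal (same result, alternative decomposition).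

-- ===== PORT A =====
def solve (x : Int) (y : Int) : String :=
  let lx := (PySem.Int.toStr x).toList
  let ly := (PySem.Int.toStr y).toList
  let key : Int := (PySem.List.pyRange 0 5 1).foldl
    (fun k i => if PySem.List.pyGet? lx i = PySem.List.pyGet? ly i then k + 1 else k) 0
  let chase : Int := (PySem.List.pyRange 0 5 1).foldl
    (fun c i => (PySem.List.pyRange 0 5 1).foldl
      (fun c j => if i ≠ j ∧ PySem.List.pyGet? lx i = PySem.List.pyGet? ly j then c + 1 else c) c) 0
  PySem.Int.toStr key ++ " Keys and " ++ PySem.Int.toStr chase ++ " Chase"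

-- ===== PORT B =====
def solve_alt (x : Int) (y : Int) : String :=
  let lx := (PySem.Int.toStr x).toList
  let ly := (PySem.Int.toStr y).toList
  let key : Int := (PySem.List.pyRange 0 5 1).foldl
    (fun k i => if PySem.List.pyGet? lx i = PySem.List.pyGet? ly i then k + 1 else k) 0
  let x5 := lx.take 5
  let y5 := ly.take 5
  let total : Int := x5.foldl (fun s c => s + (y5.count c : Int)) 0
  let chase : Int := total - key
  PySem.Int.toStr key ++ " Keys and " ++ PySem.Int.toStr chase ++ " Chase"

-- ===== PRECONDITION & SPEC =====
-- Pre_ excludes exactly the inputs where str(x) or str(y) has fewer than 5 characters,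
-- on which A raises IndexError (x[i] for i < 5).
def Pre_solve (x : Int) (y : Int) : Prop :=
  5 ≤ (PySem.Int.toStr x).toList.length ∧ 5 ≤ (PySem.Int.toStr y).toList.length
instance (x : Int) (y : Int) : Decidable (Pre_solve x y) := by unfold Pre_solve; infer_instance
def pvWitness_solve : Int × Int := (12345, 54321)
def Spec_solve (x : Int) (y : Int) (out : String) : Prop := out = solve_alt x y
instance (x : Int) (y : Int) (out : String) : Decidable (Spec_solve x y out) := by unfold Spec_solve; infer_instance

-- ===== CLAIM (what is proved, stated in full; the proofs are below) =====
def Claim_equal_solve : Prop := ∀ (x : Int) (y : Int), Dom_solve x y → Pre_solve x y → Spec_solve x y (solve x y)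

-- ===== LEMMAS AND PROOFS =====

theorem take5 {α : Type} (l : List α) (h : 5 ≤ l.length) :
    ∃ a0 a1 a2 a3 a4 t, l = a0 :: a1 :: a2 :: a3 :: a4 :: t := by
  match l with
  | a0 :: a1 :: a2 :: a3 :: a4 :: t => exact ⟨a0, a1, a2, a3, a4, t, rfl⟩
  | [] | [_] | [_,_] | [_,_,_] | [_,_,_,_] => simp at h

theorem g0 (c0 c1 c2 c3 c4 : Char) (t : List Char) :
    PySem.List.pyGet? (c0::c1::c2::c3::c4::t) 0 = some c0 := by
  rw [show (0:Int) = ((0:Nat):Int) from rfl, PySem.List.pyGet?_natCast]; simp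

theorem g1 (c0 c1 c2 c3 c4 : Char) (t : List Char) :
    PySem.List.pyGet? (c0::c1::c2::c3::c4::t) 1 = some c1 := by
  rw [show (1:Int) = ((1:Nat):Int) from rfl, PySem.List.pyGet?_natCast]; simp

theorem g2 (c0 c1 c2 c3 c4 : Char) (t : List Char) :
    PySem.List.pyGet? (c0::c1::c2::c3::c4::t) 2 = some c2 := by
  rw [show (2:Int) = ((2:Nat):Int) from rfl, PySem.List.pyGet?_natCast]; simp

theorem g3 (c0 c1 c2 c3 c4 : Char) (t : List Char) :
    PySem.List.pyGet? (c0::c1::c2::c3::c4::t) 3 = some c3 := by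
  rw [show (3:Int) = ((3:Nat):Int) from rfl, PySem.List.pyGet?_natCast]; simp

theorem g4 (c0 c1 c2 c3 c4 : Char) (t : List Char) :
    PySem.List.pyGet? (c0::c1::c2::c3::c4::t) 4 = some c4 := by
  rw [show (4:Int) = ((4:Nat):Int) from rfl, PySem.List.pyGet?_natCast]; simp

theorem iteFlip (p q : Char) : (if q = p then (1:Int) else 0) = if p = q then 1 else 0 := by
  by_cases h : p = q
  · simp [h]
  · simp [h, Ne.symm h]

theorem str_congr (k c c' : Int) (s t : String) (h : c = c') :
    PySem.Int.toStr k ++ s ++ PySem.Int.toStr c ++ t = PySem.Int.toStr k ++ s ++ PySem.Int.toStr c' ++ t := by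
  rw [h]

-- ===== VERDICT (by name: the statement is the Claim_ definition above) =====
set_option maxHeartbeats 1000000 in
theorem solve_spec : Claim_equal_solve := by
  intro x y _ hpre
  obtain ⟨hx, hy⟩ := hpre
  obtain ⟨a0, a1, a2, a3, a4, ta, hlx⟩ := take5 _ hx
  obtain ⟨b0, b1, b2, b3, b4, tb, hly⟩ := take5 _ hy
  unfold Spec_solve solve solve_alt
  rw [hlx, hly]
  simp only [PySem.List.foldl_ite_add_one, PySem.List.foldl_add]
  simp only [show PySem.List.pyRange 0 5 1 = [0,1,2,3,4] from by decide,
    List.map, List.sum_cons, List.sum_nil, List.countP_cons, List.countP_nil,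
    List.count_cons, List.count_nil, List.take,
    g0, g1, g2, g3, g4, Option.some.injEq]
  apply str_congr
  simp only [decide_eq_true_eq, beq_iff_eq, ne_eq]
  push_cast
  simp only [not_false_eq_true, not_true_eq_false, true_and, false_and, if_false]
  rw [iteFlip a0 b0, iteFlip a0 b1, iteFlip a0 b2, iteFlip a0 b3, iteFlip a0 b4, iteFlip a1 b0, iteFlip a1 b1, iteFlip a1 b2, iteFlip a1 b3, iteFlip a1 b4, iteFlip a2 b0, iteFlip a2 b1, iteFlip a2 b2, iteFlip a2 b3, iteFlip a2 b4, iteFlip a3 b0, iteFlip a3 b1, iteFlip a3 b2, iteFlip a3 b3, iteFlip a3 b4, iteFlip a4 b0, iteFlip a4 b1, iteFlip a4 b2, iteFlip a4 b3, iteFlip a4 b4]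
  ring
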